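-- pv_equiv track=rewrite | github.com/Cayo-Cesar/algoritmo-remontagem | assembler.py | best_sobreposition
-- ===== SOURCE A (Python) =====
-- def best_sobreposition(genome, kmers):
--     best_sobreposition_len = 0
--     best_kmer_index = -1
--     k = len(kmers[0])
--
--     for i, kmer in enumerate(kmers):
--         for j in range(k - 1, 0, -1):
--             if genome.endswith(kmer[:j]):
--                 if j > best_sobreposition_len:
--                     best_sobreposition_len = j
--                     best_kmer_index = i
--                 break
--             elif genome.startswith(kmer[-j:]):
--                 if j > best_sobreposition_len:
--                     best_sobreposition_len = j
--                     best_kmer_index = i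
--                 break
--
--     return best_sobreposition_len, best_kmer_index
-- ===== SOURCE B (Python) =====
-- def best_sobreposition(genome, kmers):
--     # Scan overlap lengths from largest to smallest; the first length at which
--     # any kmer matches is the best one, and the first matching kmer wins ties.
--     k = len(kmers[0])
--     for j in range(k - 1, 0, -1):
--         for i, kmer in enumerate(kmers):
--             if genome.endswith(kmer[:j]) or genome.startswith(kmer[-j:]):
--                 return j, i
--     return 0, -1
-- ===== Notes on version B (the rewrite author's own statement) =====
-- stated objective: simpler
-- what changed: B transposes the loops: instead of tracking a running best while scanning all overlap lengths per kmer, it scans overlap lengths once from largest to smallest over all kmers and returns at the first match, needing no accumulator.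
import Mathlib
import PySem

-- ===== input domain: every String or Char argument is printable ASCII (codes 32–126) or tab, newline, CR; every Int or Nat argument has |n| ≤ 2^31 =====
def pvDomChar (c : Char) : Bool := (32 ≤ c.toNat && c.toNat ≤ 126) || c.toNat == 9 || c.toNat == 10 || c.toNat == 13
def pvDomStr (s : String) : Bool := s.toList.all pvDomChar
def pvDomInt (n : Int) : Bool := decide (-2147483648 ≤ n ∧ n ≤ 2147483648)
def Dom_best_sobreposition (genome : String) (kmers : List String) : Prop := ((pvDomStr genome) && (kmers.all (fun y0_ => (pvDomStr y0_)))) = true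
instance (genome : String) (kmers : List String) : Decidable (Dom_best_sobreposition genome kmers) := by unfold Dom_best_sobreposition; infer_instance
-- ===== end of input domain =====

-- B transposes A's loops: one descending scan over overlap lengths, first match wins (simpler: no running best).

-- ===== PORT A =====
-- inner 'for j in range(k-1, 0, -1): … break' carrying the running (best_len, best_index)
def bsInnerA (genome kmer : String) (i : Int) : List Int → Int × Int → Int × Int
  | [], st => st
  | j :: js, (bl, bi) =>
    if PySem.Str.endswith genome (PySem.Str.slice kmer none (some j)) then
      (if j > bl then (j, i) else (bl, bi))
    else if PySem.Str.startswith genome (PySem.Str.slice kmer (some (-j)) none) then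
      (if j > bl then (j, i) else (bl, bi))
    else
      bsInnerA genome kmer i js (bl, bi)

def best_sobreposition (genome : String) (kmers : List String) : Int × Int :=
  match kmers with
  | [] => (0, -1)  -- Python raises IndexError on kmers[0]; excluded by Pre_
  | k0 :: _ =>
    (PySem.List.enumerate kmers 0).foldl
      (fun st p => bsInnerA genome p.2 p.1 (PySem.List.pyRange ((PySem.Str.len k0 : Int) - 1) 0 (-1)) st)
      (0, -1)

-- ===== PORT B =====
-- the shared test: genome.endswith(kmer[:j]) or genome.startswith(kmer[-j:])
def bsCond (genome kmer : String) (j : Int) : Bool :=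
  PySem.Str.endswith genome (PySem.Str.slice kmer none (some j)) ||
  PySem.Str.startswith genome (PySem.Str.slice kmer (some (-j)) none)

-- inner 'for i, kmer in enumerate(kmers): if …: return j, i'
def bsFindB (genome : String) (j : Int) : List (Int × String) → Option Int
  | [] => none
  | (i, kmer) :: rest => if bsCond genome kmer j then some i else bsFindB genome j rest

def bsOuterB (genome : String) (ek : List (Int × String)) : List Int → Int × Int
  | [] => (0, -1)
  | j :: js =>
    match bsFindB genome j ek with
    | some i => (j, i)
    | none => bsOuterB genome ek js

def best_sobreposition_alt (genome : String) (kmers : List String) : Int × Int :=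
  match kmers with
  | [] => (0, -1)  -- Python raises IndexError on kmers[0]; excluded by Pre_
  | k0 :: _ =>
    bsOuterB genome (PySem.List.enumerate kmers 0)
      (PySem.List.pyRange ((PySem.Str.len k0 : Int) - 1) 0 (-1))

-- ===== PRECONDITION & SPEC =====
-- Pre_ excludes only kmers = [], on which the Python A raises IndexError (kmers[0]).
def Pre_best_sobreposition (genome : String) (kmers : List String) : Prop := kmers ≠ []
instance (genome : String) (kmers : List String) : Decidable (Pre_best_sobreposition genome kmers) := by unfold Pre_best_sobreposition; infer_instance
def pvWitness_best_sobreposition : String × List String := ("ACGTAC", ["CTAG", "TACG", "GTAA"])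

def Spec_best_sobreposition (genome : String) (kmers : List String) (out : Int × Int) : Prop := out = best_sobreposition_alt genome kmers
instance (genome : String) (kmers : List String) (out : Int × Int) : Decidable (Spec_best_sobreposition genome kmers out) := by unfold Spec_best_sobreposition; infer_instance

-- ===== CLAIM (what is proved, stated in full; the proofs are below) =====
def Claim_equal_best_sobreposition : Prop := ∀ (genome : String) (kmers : List String), Dom_best_sobreposition genome kmers → Pre_best_sobreposition genome kmers → Spec_best_sobreposition genome kmers (best_sobreposition genome kmers)

-- ===== LEMMAS AND PROOFS =====

-- A's inner loop, re-expressed through find? on the j-list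
def bsStep (genome : String) (J : List Int) (st : Int × Int) (p : Int × String) : Int × Int :=
  match J.find? (bsCond genome p.2) with
  | some j => if j > st.1 then (j, p.1) else st
  | none => st

theorem bsInnerA_eq_step (genome kmer : String) (i : Int) (J : List Int) (st : Int × Int) :
    bsInnerA genome kmer i J st = bsStep genome J st (i, kmer) := by
  induction J generalizing st with
  | nil => simp [bsInnerA, bsStep]
  | cons j js ih =>
    obtain ⟨bl, bi⟩ := st
    by_cases h1 : PySem.Chars.endswith genome.toList (PySem.List.slice kmer.toList none (some j)) = true
    · simp [bsInnerA, bsStep, bsCond, h1]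
    · by_cases h2 : PySem.Chars.startswith genome.toList (PySem.List.slice kmer.toList (some (-j)) none) = true
      · simp [bsInnerA, bsStep, bsCond, h1, h2]
      · simp [bsInnerA, h1, h2]
        rw [ih (bl, bi)]
        simp [bsStep, bsCond, h1, h2]

theorem bsFindB_eq_find? (genome : String) (j : Int) (ek : List (Int × String)) :
    bsFindB genome j ek = (ek.find? (fun p => bsCond genome p.2 j)).map Prod.fst := by
  induction ek with
  | nil => simp [bsFindB]
  | cons p rest ih =>
    obtain ⟨i, kmer⟩ := p
    by_cases h : bsCond genome kmer j
    · simp [bsFindB, h]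
    · simp [bsFindB, h, ih]

theorem bsStep_hit (genome : String) (J : List Int) (st : Int × Int) (p : Int × String)
    (j : Int) (hf : J.find? (bsCond genome p.2) = some j) (hlt : st.1 < j) :
    bsStep genome J st p = (j, p.1) := by
  unfold bsStep
  rw [hf]
  simp [hlt]

-- states below c stay below c when every available value is below c
theorem bs_fold_lt (genome : String) (J : List Int) (c : Int) (es : List (Int × String))
    (st : Int × Int) (hst : st.1 < c)
    (h : ∀ p ∈ es, ∀ j, J.find? (bsCond genome p.2) = some j → j < c) :
    (es.foldl (bsStep genome J) st).1 < c := by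
  induction es generalizing st with
  | nil => simpa using hst
  | cons p rest ih =>
    simp only [List.foldl_cons]
    apply ih
    · unfold bsStep
      cases hf : J.find? (bsCond genome p.2) with
      | none => simpa using hst
      | some j =>
        have := h p (by simp) j hf
        by_cases hj : j > st.1 <;> simp [hj] <;> omega
    · intro q hq j hf; exact h q (by simp [hq]) j hf

-- no strictly larger value available ⇒ the state is frozen
theorem bs_fold_frozen (genome : String) (J : List Int) (es : List (Int × String))
    (st : Int × Int)
    (h : ∀ p ∈ es, ∀ j, J.find? (bsCond genome p.2) = some j → j ≤ st.1) :
    es.foldl (bsStep genome J) st = st := by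
  induction es with
  | nil => simp
  | cons p rest ih =>
    simp only [List.foldl_cons]
    have hstep : bsStep genome J st p = st := by
      unfold bsStep
      cases hf : J.find? (bsCond genome p.2) with
      | none => rfl
      | some j =>
        have := h p (by simp) j hf
        simp [show ¬ j > st.1 by omega]
    rw [hstep]
    exact ih (fun q hq j hf => h q (by simp [hq]) j hf)

theorem bs_main (genome : String) (n : Nat) (ek : List (Int × String)) :
    ek.foldl (bsStep genome (PySem.List.pyRange (n : Int) 0 (-1))) (0, -1)
      = bsOuterB genome ek (PySem.List.pyRange (n : Int) 0 (-1)) := by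
  induction n generalizing ek with
  | zero =>
    rw [PySem.List.pyRange_neg_one_eq_nil (by norm_num)]
    rw [bs_fold_frozen genome [] ek (0, -1) (by intro p _ j hf; simp at hf)]
    simp [bsOuterB]
  | succ m ih =>
    have hcons : PySem.List.pyRange ((m + 1 : Nat) : Int) 0 (-1)
        = ((m : Int) + 1) :: PySem.List.pyRange (m : Int) 0 (-1) := by
      rw [PySem.List.pyRange_neg_one_cons (by push_cast; omega)]
      push_cast
      ring_nf
    set J' := PySem.List.pyRange (m : Int) 0 (-1) with hJ'
    have hmemJ' : ∀ j ∈ J', j ≤ (m : Int) := fun j hj =>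
      (PySem.List.mem_pyRange_neg_one.mp hj).2
    rw [hcons]
    cases hfB : bsFindB genome ((m : Int) + 1) ek with
    | none =>
      -- nobody matches at the head length: both sides fall through to J'
      have hnone : ek.find? (fun p => bsCond genome p.2 ((m : Int) + 1)) = none := by
        rw [bsFindB_eq_find?] at hfB
        cases h : ek.find? (fun p => bsCond genome p.2 ((m : Int) + 1)) with
        | none => rfl
        | some p => rw [h] at hfB; simp at hfB
      have hno : ∀ p ∈ ek, bsCond genome p.2 ((m : Int) + 1) = false := by
        intro p hp
        have := List.find?_eq_none.mp hnone p hp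
        simpa using this
      have hfold : ek.foldl (bsStep genome (((m : Int) + 1) :: J')) (0, -1)
          = ek.foldl (bsStep genome J') (0, -1) := by
        apply List.foldl_ext
        intro st p hp
        unfold bsStep
        rw [List.find?_cons_of_neg (by simp [hno p hp])]
      rw [hfold, ih ek]
      simp [bsOuterB, hfB]
    | some i0 =>
      -- first matching kmer at the head length: A's fold lands exactly on (m+1, i0)
      have hfind' := hfB
      rw [bsFindB_eq_find?] at hfind'
      cases hfind : ek.find? (fun p => bsCond genome p.2 ((m : Int) + 1)) with
      | none => rw [hfind] at hfind'; simp at hfind'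
      | some p0 =>
        rw [hfind] at hfind'
        simp only [Option.map_some, Option.some.injEq] at hfind'
        obtain ⟨hp0, l₁, l₂, hsplit, hpre⟩ := List.find?_eq_some_iff_append.mp hfind
        have hpre' : ∀ a ∈ l₁, bsCond genome a.2 ((m : Int) + 1) = false := by
          intro a ha
          have := hpre a ha
          simpa using this
        set J := ((m : Int) + 1) :: J' with hJdef
        -- fold over l₁ keeps the best strictly below m+1
        have h1 : (l₁.foldl (bsStep genome J) (0, -1)).1 < (m : Int) + 1 := by
          apply bs_fold_lt
          · norm_num
          · intro p hp j hf
            rw [hJdef, List.find?_cons_of_neg (by simp [hpre' p hp])] at hf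
            have hjJ' : j ∈ J' := List.mem_of_find?_eq_some hf
            have := hmemJ' j hjJ'
            omega
        -- step at p0 jumps to (m+1, p0.1)
        have hfJ : J.find? (bsCond genome p0.2) = some ((m : Int) + 1) := by
          rw [hJdef, List.find?_cons_of_pos (by simpa using hp0)]
        have hstep : bsStep genome J (l₁.foldl (bsStep genome J) (0, -1)) p0
            = ((m : Int) + 1, p0.1) :=
          bsStep_hit genome J _ p0 _ hfJ h1
        -- the tail cannot improve on m+1
        have h2 : l₂.foldl (bsStep genome J) ((m : Int) + 1, p0.1) = ((m : Int) + 1, p0.1) := by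
          apply bs_fold_frozen
          intro p hp j hf
          have hjJ : j ∈ J := List.mem_of_find?_eq_some hf
          rw [hJdef] at hjJ
          rcases List.mem_cons.mp hjJ with h | h
          · omega
          · have := hmemJ' j h; omega
        rw [hsplit, List.foldl_append, List.foldl_cons, hstep, h2, ← hsplit, hJdef]
        simp [bsOuterB, hfB, hfind']

-- ===== VERDICT (by name: the statement is the Claim_ definition above) =====
theorem best_sobreposition_spec : Claim_equal_best_sobreposition := by
  intro genome kmers _ hpre
  unfold Spec_best_sobreposition best_sobreposition best_sobreposition_alt
  match kmers with
  | [] => exact absurd rfl hpre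
  | k0 :: rest =>
    simp only
    have hfoldrw : ∀ (J : List Int),
        (PySem.List.enumerate (k0 :: rest) 0).foldl
          (fun st p => bsInnerA genome p.2 p.1 J st) (0, -1)
        = (PySem.List.enumerate (k0 :: rest) 0).foldl (bsStep genome J) (0, -1) := by
      intro J
      apply List.foldl_ext
      intro st p _
      exact bsInnerA_eq_step genome p.2 p.1 J st
    rw [hfoldrw]
    have hlen : (PySem.Str.len k0 : Int) = (k0.length : Int) := by
      simp [PySem.Str.len_eq]
    rcases Nat.eq_zero_or_pos k0.length with h0 | h0
    · -- k = 0: the j-range is empty on both sides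
      have hnil : PySem.List.pyRange ((PySem.Str.len k0 : Int) - 1) 0 (-1) = [] := by
        apply PySem.List.pyRange_neg_one_eq_nil
        rw [hlen, h0]; norm_num
      rw [hnil]
      rw [bs_fold_frozen genome [] _ (0, -1) (by intro p _ j hf; simp at hf)]
      simp [bsOuterB]
    · have hcast : (PySem.Str.len k0 : Int) - 1 = ((k0.length - 1 : Nat) : Int) := by
        rw [hlen]; omega
      rw [hcast]
      exact bs_main genome (k0.length - 1) (PySem.List.enumerate (k0 :: rest) 0)
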